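-- pv_equiv track=rewrite | github.com/sukminc/hero-performance-os | app/api/hud_trend.py | _street_actions
-- ===== SOURCE A (Python) =====
-- def _street_actions(block: list[str]) -> dict[str, list[dict[str, str]]]:
--     actions = {"preflop": [], "flop": [], "turn": [], "river": []}
--     current_street = None
--     for row in block:
--         if row == "*** HOLE CARDS ***":
--             current_street = "preflop"
--             continue
--         if row.startswith("*** FLOP ***"):
--             current_street = "flop"
--             continue
--         if row.startswith("*** TURN ***"):
--             current_street = "turn"
--             continue
--         if row.startswith("*** RIVER ***"):
--             current_street = "river"
--             continue
--         if row.startswith("*** SHOWDOWN ***") or row.startswith("*** SUMMARY ***"):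
--             current_street = None
--             continue
--         if current_street is None or ":" not in row:
--             continue
--         actor, remainder = row.split(":", 1)
--         remainder = remainder.strip()
--         if remainder.startswith("folds"):
--             action = "fold"
--         elif remainder.startswith("checks"):
--             action = "check"
--         elif remainder.startswith("calls"):
--             action = "call"
--         elif remainder.startswith("bets"):
--             action = "bet"
--         elif remainder.startswith("raises"):
--             action = "raise"
--         else:
--             continue
--         actions[current_street].append({"actor": actor, "action": action, "row": row})
--     return actions
-- ===== SOURCE B (Python) =====
-- _VERBS = [("folds", "fold"), ("checks", "check"), ("calls", "call"),
--           ("bets", "bet"), ("raises", "raise")]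
--
--
-- def _marker(row):
--     if row == "*** HOLE CARDS ***":
--         return "preflop"
--     if row.startswith("*** FLOP ***"):
--         return "flop"
--     if row.startswith("*** TURN ***"):
--         return "turn"
--     if row.startswith("*** RIVER ***"):
--         return "river"
--     return None
--
--
-- def _street_actions(block: list[str]) -> dict[str, list[dict[str, str]]]:
--     # pass 1: cut the block into (street, rows) segments
--     segments = []
--     current_rows = None
--     for row in block:
--         street = _marker(row)
--         if street is not None:
--             current_rows = []
--             segments.append((street, current_rows))
--         elif row.startswith("*** SHOWDOWN ***") or row.startswith("*** SUMMARY ***"):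
--             current_rows = None
--         elif current_rows is not None:
--             current_rows.append(row)
--     # pass 2: classify each segment's rows
--     actions = {"preflop": [], "flop": [], "turn": [], "river": []}
--     for street, rows in segments:
--         bucket = actions[street]
--         for row in rows:
--             if ":" not in row:
--                 continue
--             actor, remainder = row.split(":", 1)
--             remainder = remainder.strip()
--             for verb, action in _VERBS:
--                 if remainder.startswith(verb):
--                     bucket.append({"actor": actor, "action": action, "row": row})
--                     break
--     return actions
-- ===== Notes on version B (the rewrite author's own statement) =====
-- stated objective: alternative
-- what changed: A classifies rows and fills the dict in a single stateful loop; B first cuts the block into an ordered list of (street, rows) segments and then, in a separate pass, classifies each segment's rows via a verb table and fills the dict.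
import Mathlib
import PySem

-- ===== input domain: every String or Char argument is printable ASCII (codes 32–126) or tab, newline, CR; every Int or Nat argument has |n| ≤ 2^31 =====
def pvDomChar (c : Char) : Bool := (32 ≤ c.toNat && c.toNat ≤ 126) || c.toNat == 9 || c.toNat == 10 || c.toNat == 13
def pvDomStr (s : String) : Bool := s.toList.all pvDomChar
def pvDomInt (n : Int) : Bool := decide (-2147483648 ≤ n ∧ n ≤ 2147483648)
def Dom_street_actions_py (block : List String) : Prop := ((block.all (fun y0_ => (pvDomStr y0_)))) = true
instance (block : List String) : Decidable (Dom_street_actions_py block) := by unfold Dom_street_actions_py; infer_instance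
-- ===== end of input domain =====

-- B replaces A's single stateful loop by two passes (segment collection, then classification); same cost, different decomposition.

-- ===== PORT A =====
-- A's loop state: (actions dict, current_street); each row is handled exactly in A's branch order.
def pvAStep (st : PySem.Dict String (List (List (String × String))) × Option String) (row : String) :
    PySem.Dict String (List (List (String × String))) × Option String :=
  if row == "*** HOLE CARDS ***" then (st.1, some "preflop")
  else if PySem.Str.startswith row "*** FLOP ***" then (st.1, some "flop")
  else if PySem.Str.startswith row "*** TURN ***" then (st.1, some "turn")
  else if PySem.Str.startswith row "*** RIVER ***" then (st.1, some "river")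
  else if PySem.Str.startswith row "*** SHOWDOWN ***" || PySem.Str.startswith row "*** SUMMARY ***" then (st.1, none)
  else match st.2 with
    | none => st
    | some street =>
      if PySem.Str.isIn ":" row = false then st
      else match PySem.Str.splitMax? row ":" 1 with
        | some (actor :: remainder0 :: _) =>
          let remainder := PySem.Str.strip remainder0
          if PySem.Str.startswith remainder "folds" then
            (st.1.modify street [] (· ++ [[("actor", actor), ("action", "fold"), ("row", row)]]), st.2)
          else if PySem.Str.startswith remainder "checks" then
            (st.1.modify street [] (· ++ [[("actor", actor), ("action", "check"), ("row", row)]]), st.2)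
          else if PySem.Str.startswith remainder "calls" then
            (st.1.modify street [] (· ++ [[("actor", actor), ("action", "call"), ("row", row)]]), st.2)
          else if PySem.Str.startswith remainder "bets" then
            (st.1.modify street [] (· ++ [[("actor", actor), ("action", "bet"), ("row", row)]]), st.2)
          else if PySem.Str.startswith remainder "raises" then
            (st.1.modify street [] (· ++ [[("actor", actor), ("action", "raise"), ("row", row)]]), st.2)
          else st
        | _ => st

def street_actions_py (block : List String) : List (String × List (List (String × String))) :=
  (block.foldl pvAStep
    (PySem.Dict.mk [("preflop", []), ("flop", []), ("turn", []), ("river", [])], none)).1.items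

-- ===== PORT B =====
def pvVerbs : List (String × String) :=
  [("folds", "fold"), ("checks", "check"), ("calls", "call"), ("bets", "bet"), ("raises", "raise")]

def pvMarker (row : String) : Option String :=
  if row == "*** HOLE CARDS ***" then some "preflop"
  else if PySem.Str.startswith row "*** FLOP ***" then some "flop"
  else if PySem.Str.startswith row "*** TURN ***" then some "turn"
  else if PySem.Str.startswith row "*** RIVER ***" then some "river"
  else none

-- pass-1 step; Python's mutable current_rows alias is modelled as an open segment carried beside the closed ones
def pvSeg1 (st : List (String × List String) × Option (String × List String)) (row : String) :
    List (String × List String) × Option (String × List String) :=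
  match pvMarker row with
  | some s => (st.1 ++ (match st.2 with | some seg => [seg] | none => []), some (s, []))
  | none =>
    if PySem.Str.startswith row "*** SHOWDOWN ***" || PySem.Str.startswith row "*** SUMMARY ***" then
      (st.1 ++ (match st.2 with | some seg => [seg] | none => []), none)
    else match st.2 with
      | some (s, rs) => (st.1, some (s, rs ++ [row]))
      | none => st

-- classification of one row: skip if no ':', else first matching verb of the table (= the inner for/break)
def pvClassify (row : String) : Option (List (String × String)) :=
  if PySem.Str.isIn ":" row = false then none
  else match PySem.Str.splitMax? row ":" 1 with
    | some (actor :: remainder0 :: _) =>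
      let remainder := PySem.Str.strip remainder0
      (pvVerbs.find? (fun p => PySem.Str.startswith remainder p.1)).map
        (fun p => [("actor", actor), ("action", p.2), ("row", row)])
    | _ => none

def street_actions_py_alt (block : List String) : List (String × List (List (String × String))) :=
  let p1 := block.foldl pvSeg1 ([], none)
  let segments := p1.1 ++ (match p1.2 with | some seg => [seg] | none => [])
  (segments.foldl
    (fun d seg => d.modify seg.1 []
      (fun b => seg.2.foldl (fun b row =>
        match pvClassify row with | some r => b ++ [r] | none => b) b))
    (PySem.Dict.mk [("preflop", []), ("flop", []), ("turn", []), ("river", [])])).items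

-- ===== PRECONDITION & SPEC =====
def Spec_street_actions_py (block : List String) (out : List (String × List (List (String × String)))) : Prop := out = street_actions_py_alt block
instance (block : List String) (out : List (String × List (List (String × String)))) : Decidable (Spec_street_actions_py block out) := by unfold Spec_street_actions_py; infer_instance

-- ===== CLAIM (what is proved, stated in full; the proofs are below) =====
def Claim_equal_street_actions_py : Prop := ∀ (block : List String), Dom_street_actions_py block → Spec_street_actions_py block (street_actions_py block)

-- ===== LEMMAS AND PROOFS =====

abbrev PvDictT : Type := PySem.Dict String (List (List (String × String)))

-- generic Dict facts -------------------------------------------------------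

lemma pv_insert_pos {κ ν : Type} [BEq κ] (l : List (κ × ν)) (k : κ) (v : ν)
    (h : (PySem.Dict.mk l).contains k = true) :
    (PySem.Dict.mk l).insert k v = PySem.Dict.mk (l.map (fun p => if p.1 == k then (k, v) else p)) := by
  unfold PySem.Dict.insert
  rw [if_pos h]

lemma pv_insert_neg {κ ν : Type} [BEq κ] (l : List (κ × ν)) (k : κ) (v : ν)
    (h : (PySem.Dict.mk l).contains k = false) :
    (PySem.Dict.mk l).insert k v = PySem.Dict.mk (l ++ [(k, v)]) := by
  unfold PySem.Dict.insert
  rw [if_neg (by simp [h])]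

lemma pv_list_replace_self {κ ν : Type} [BEq κ] [LawfulBEq κ] (l : List (κ × ν)) (k : κ) (p : κ × ν)
    (hn : (l.map Prod.fst).Nodup) (hp : l.find? (fun q => q.1 == k) = some p) :
    l.map (fun q => if q.1 == k then (k, p.2) else q) = l := by
  induction l with
  | nil => simp at hp
  | cons q l ih =>
    by_cases hq : (q.1 == k) = true
    · have hpq : q = p := by
        rw [List.find?_cons] at hp
        simp [hq] at hp
        exact hp
      subst hpq
      have hk : q.1 = k := eq_of_beq hq
      have hnot : q.1 ∉ l.map Prod.fst := (List.nodup_cons.mp hn).1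
      have htail : ∀ r ∈ l, (if (r.1 == k) = true then (k, q.2) else r) = r := by
        intro r hr
        have hrk : (r.1 == k) = false := by
          by_contra hcon
          have hb : (r.1 == k) = true := by revert hcon; cases (r.1 == k) <;> simp
          exact hnot (hk ▸ (eq_of_beq hb) ▸ List.mem_map_of_mem hr)
        simp [hrk]
      simp only [List.map_cons, hq, if_true]
      rw [List.map_congr_left htail, show (fun a : κ × ν => a) = id from rfl, List.map_id]
      have hkq : (k, q.2) = q := by rw [← hk]
      rw [hkq]
    · have hq' : (q.1 == k) = false := by revert hq; cases (q.1 == k) <;> simp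
      rw [List.find?_cons] at hp
      simp [hq'] at hp
      simp only [List.map_cons, hq', Bool.false_eq_true, if_false]
      rw [ih (List.nodup_cons.mp hn).2 hp]

lemma pv_insert_insert_self {κ ν : Type} [BEq κ] [LawfulBEq κ] (d : PySem.Dict κ ν) (k : κ) (a b : ν) :
    (d.insert k a).insert k b = d.insert k b := by
  obtain ⟨l⟩ := d
  by_cases h : (PySem.Dict.mk l).contains k = true
  · have h2 : (PySem.Dict.mk (l.map (fun p => if p.1 == k then (k, a) else p))).contains k = true := by
      rw [← pv_insert_pos l k a h]
      simp [PySem.Dict.contains_insert]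
    rw [pv_insert_pos l k a h, pv_insert_pos _ k b h2, pv_insert_pos l k b h]
    congr 1
    rw [List.map_map]
    apply List.map_congr_left
    intro p _
    by_cases hp : (p.1 == k) = true <;> simp [hp, Function.comp]
  · have hfalse : (PySem.Dict.mk l).contains k = false := by
      revert h; cases hcc : (PySem.Dict.mk l).contains k <;> simp
    have h2 : (PySem.Dict.mk (l ++ [(k, a)])).contains k = true := by
      simp [PySem.Dict.contains]
    rw [pv_insert_neg l k a hfalse, pv_insert_pos _ k b h2, pv_insert_neg l k b hfalse]
    congr 1
    have hany : l.any (fun p => p.1 == k) = false := hfalse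
    have hall : ∀ p ∈ l, (p.1 == k) = false := by
      intro p hp
      have := List.any_eq_false.mp hany p hp
      revert this; cases (p.1 == k) <;> simp
    rw [List.map_append]
    have hmap : l.map (fun p => if (p.1 == k) = true then (k, b) else p) = l := by
      refine (List.map_congr_left ?_).trans (List.map_id l)
      intro p hp; simp [hall p hp]
    rw [hmap]
    simp

lemma pv_insert_getD_self {κ ν : Type} [BEq κ] [LawfulBEq κ] (d : PySem.Dict κ ν) (k : κ) (dflt : ν)
    (hn : d.keys.Nodup) (hc : d.contains k = true) : d.insert k (d.getD k dflt) = d := by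
  obtain ⟨l⟩ := d
  have hl : l.any (fun p => p.1 == k) = true := hc
  obtain ⟨p, hpmem, hpk⟩ := List.any_eq_true.mp hl
  have hfind : l.find? (fun q => q.1 == k) ≠ none := by
    rw [Ne, List.find?_eq_none]
    push_neg
    exact ⟨p, hpmem, hpk⟩
  obtain ⟨p0, hp0⟩ := Option.ne_none_iff_exists'.mp hfind
  have hgd : (PySem.Dict.mk l).getD k dflt = p0.2 := by
    simp [PySem.Dict.getD, PySem.Dict.get?, hp0]
  rw [hgd, pv_insert_pos l k p0.2 hc]
  congr 1
  exact pv_list_replace_self l k p0 hn hp0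

lemma pv_modify_modify_self {κ ν : Type} [BEq κ] [LawfulBEq κ] (d : PySem.Dict κ ν) (k : κ)
    (d0 : ν) (f g : ν → ν) :
    (d.modify k d0 f).modify k d0 g = d.modify k d0 (fun v => g (f v)) := by
  unfold PySem.Dict.modify
  rw [PySem.Dict.getD_insert_self, pv_insert_insert_self]

lemma pv_modify_id {κ ν : Type} [BEq κ] [LawfulBEq κ] (d : PySem.Dict κ ν) (k : κ) (d0 : ν)
    (hn : d.keys.Nodup) (hc : d.contains k = true) : d.modify k d0 (fun v => v) = d := by
  unfold PySem.Dict.modify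
  exact pv_insert_getD_self d k d0 hn hc

-- proof-side views of the two programs --------------------------------------

def pvApplySeg (d : PvDictT) (seg : String × List String) : PvDictT :=
  d.modify seg.1 [] (· ++ seg.2.filterMap pvClassify)

def pvFlush (o : Option (String × List String)) : List (String × List String) :=
  match o with | some seg => [seg] | none => []

def pvApplyCur (d : PvDictT) (cur : Option (String × List String)) : PvDictT :=
  match cur with | none => d | some seg => pvApplySeg d seg

def pvSegsFrom (cur : Option (String × List String)) (t : List String) : List (String × List String) :=
  (t.foldl pvSeg1 ([], cur)).1 ++ pvFlush (t.foldl pvSeg1 ([], cur)).2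

def pvInv (d : PvDictT) : Prop :=
  d.keys.Nodup ∧ d.contains "preflop" = true ∧ d.contains "flop" = true ∧
    d.contains "turn" = true ∧ d.contains "river" = true

def pvStreets (s : String) : Prop := s = "preflop" ∨ s = "flop" ∨ s = "turn" ∨ s = "river"

def pvCurOK : Option (String × List String) → Prop
  | none => True
  | some (s, _) => pvStreets s

lemma pvInv_modify (d : PvDictT) (k : String) (f : List (List (String × String)) → List (List (String × String)))
    (hd : pvInv d) : pvInv (d.modify k [] f) := by
  obtain ⟨h0, h1, h2, h3, h4⟩ := hd
  unfold PySem.Dict.modify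
  exact ⟨PySem.Dict.nodup_keys_insert _ _ _ h0,
    by simp [PySem.Dict.contains_insert, h1],
    by simp [PySem.Dict.contains_insert, h2],
    by simp [PySem.Dict.contains_insert, h3],
    by simp [PySem.Dict.contains_insert, h4]⟩

lemma pvInv_applyCur (d : PvDictT) (cur : Option (String × List String)) (hd : pvInv d) :
    pvInv (pvApplyCur d cur) := by
  cases cur with
  | none => exact hd
  | some seg => exact pvInv_modify d seg.1 _ hd

lemma pv_contains_of_street (d : PvDictT) (s : String) (hd : pvInv d) (hs : pvStreets s) :
    d.contains s = true := by
  rcases hs with h | h | h | h <;> subst h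
  · exact hd.2.1
  · exact hd.2.2.1
  · exact hd.2.2.2.1
  · exact hd.2.2.2.2

lemma pvApplySeg_nil (d : PvDictT) (s : String) (hd : pvInv d) (hs : pvStreets s) :
    pvApplySeg d (s, []) = d := by
  unfold pvApplySeg
  simp only [List.filterMap_nil, List.append_nil]
  exact pv_modify_id d s [] hd.1 (pv_contains_of_street d s hd hs)

lemma pv_foldl_flush (d : PvDictT) (cur : Option (String × List String)) :
    (pvFlush cur).foldl pvApplySeg d = pvApplyCur d cur := by
  cases cur <;> simp [pvFlush, pvApplyCur]

-- one pass-1 step from an arbitrary list of closed segments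
lemma pvSeg1_step (done : List (String × List String)) (cur : Option (String × List String)) (row : String) :
    pvSeg1 (done, cur) row = (done ++ (pvSeg1 ([], cur) row).1, (pvSeg1 ([], cur) row).2) := by
  unfold pvSeg1
  cases pvMarker row with
  | some s => cases cur <;> simp
  | none =>
    cases cur with
    | none => split_ifs <;> simp
    | some seg => obtain ⟨s, rs⟩ := seg; split_ifs <;> simp

lemma pvSeg1_shift (t : List String) : ∀ (done : List (String × List String)) (cur : Option (String × List String)),
    t.foldl pvSeg1 (done, cur) = (done ++ (t.foldl pvSeg1 ([], cur)).1, (t.foldl pvSeg1 ([], cur)).2) := by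
  induction t with
  | nil => intro done cur; simp
  | cons row t ih =>
    intro done cur
    simp only [List.foldl_cons]
    rw [pvSeg1_step done cur row]
    rcases hstep : pvSeg1 ([], cur) row with ⟨X, c'⟩
    simp only
    rw [ih (done ++ X) c', ih X c', List.append_assoc]

lemma pvSegsFrom_cons (row : String) (t : List String) (cur : Option (String × List String)) :
    pvSegsFrom cur (row :: t) =
      (pvSeg1 ([], cur) row).1 ++ pvSegsFrom (pvSeg1 ([], cur) row).2 t := by
  unfold pvSegsFrom
  simp only [List.foldl_cons]
  rcases hstep : pvSeg1 ([], cur) row with ⟨X, c'⟩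
  simp only
  rw [pvSeg1_shift t X c', List.append_assoc]

lemma pv_foldl_applySeg_append (d : PvDictT) (xs ys : List (String × List String)) :
    (xs ++ ys).foldl pvApplySeg d = ys.foldl pvApplySeg (xs.foldl pvApplySeg d) :=
  List.foldl_append

lemma pv_foldl_classify (rs : List String) : ∀ (b : List (List (String × String))),
    rs.foldl (fun b row => match pvClassify row with | some r => b ++ [r] | none => b) b
      = b ++ rs.filterMap pvClassify := by
  induction rs with
  | nil => intro b; simp
  | cons r rs ih =>
    intro b
    simp only [List.foldl_cons, List.filterMap_cons]
    cases h : pvClassify r <;> simp [h, ih]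

lemma pvBStep_eq :
    (fun (d : PvDictT) (seg : String × List String) => d.modify seg.1 []
      (fun b => seg.2.foldl (fun b row =>
        match pvClassify row with | some r => b ++ [r] | none => b) b)) = pvApplySeg := by
  funext d seg
  unfold pvApplySeg
  congr 1
  funext b
  rw [pv_foldl_classify]

lemma pv_classify_append_none (d : PvDictT) (s : String) (rs : List String) (row : String)
    (h : pvClassify row = none) : pvApplySeg d (s, rs ++ [row]) = pvApplySeg d (s, rs) := by
  unfold pvApplySeg
  simp [List.filterMap_append, h]

lemma pv_classify_append_some (d : PvDictT) (s : String) (rs : List String) (row : String)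
    (r : List (String × String)) (h : pvClassify row = some r) :
    pvApplySeg d (s, rs ++ [row]) = (pvApplySeg d (s, rs)).modify s [] (· ++ [r]) := by
  unfold pvApplySeg
  rw [pv_modify_modify_self]
  simp [List.filterMap_append, h]

lemma pvApplyCur_some (d : PvDictT) (seg : String × List String) :
    pvApplyCur d (some seg) = pvApplySeg d seg := rfl

lemma pv_main (t : List String) : ∀ (d : PvDictT) (cur : Option (String × List String)),
    pvInv d → pvCurOK cur →
    (t.foldl pvAStep (pvApplyCur d cur, Option.map Prod.fst cur)).1
      = (pvSegsFrom cur t).foldl pvApplySeg d := by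
  induction t with
  | nil =>
    intro d cur hd hc
    unfold pvSegsFrom
    simp only [List.foldl_nil, List.nil_append]
    rw [pv_foldl_flush]
  | cons row t ih =>
    intro d cur hd hc
    rw [pvSegsFrom_cons, pv_foldl_applySeg_append]
    simp only [List.foldl_cons]
    have hd' := pvInv_applyCur d cur hd
    by_cases h1 : (row == "*** HOLE CARDS ***") = true
    · have hA : pvAStep (pvApplyCur d cur, Option.map Prod.fst cur) row
          = (pvApplyCur d cur, some "preflop") := by
        unfold pvAStep; rw [if_pos h1]
      have hS : pvSeg1 ([], cur) row = (pvFlush cur, some ("preflop", [])) := by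
        unfold pvSeg1 pvMarker; rw [if_pos h1]; cases cur <;> rfl
      rw [hA, hS]
      simp only [pv_foldl_flush]
      have hmain := ih (pvApplyCur d cur) (some ("preflop", [])) hd' (Or.inl rfl)
      rw [pvApplyCur_some, pvApplySeg_nil _ _ hd' (Or.inl rfl)] at hmain
      exact hmain
    · by_cases h2 : PySem.Str.startswith row "*** FLOP ***" = true
      · have hA : pvAStep (pvApplyCur d cur, Option.map Prod.fst cur) row
            = (pvApplyCur d cur, some "flop") := by
          unfold pvAStep; rw [if_neg h1, if_pos h2]
        have hS : pvSeg1 ([], cur) row = (pvFlush cur, some ("flop", [])) := by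
          unfold pvSeg1 pvMarker; rw [if_neg h1, if_pos h2]; cases cur <;> rfl
        rw [hA, hS]
        simp only [pv_foldl_flush]
        have hmain := ih (pvApplyCur d cur) (some ("flop", [])) hd' (Or.inr (Or.inl rfl))
        rw [pvApplyCur_some, pvApplySeg_nil _ _ hd' (Or.inr (Or.inl rfl))] at hmain
        exact hmain
      · by_cases h3 : PySem.Str.startswith row "*** TURN ***" = true
        · have hA : pvAStep (pvApplyCur d cur, Option.map Prod.fst cur) row
              = (pvApplyCur d cur, some "turn") := by
            unfold pvAStep; rw [if_neg h1, if_neg h2, if_pos h3]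
          have hS : pvSeg1 ([], cur) row = (pvFlush cur, some ("turn", [])) := by
            unfold pvSeg1 pvMarker; rw [if_neg h1, if_neg h2, if_pos h3]; cases cur <;> rfl
          rw [hA, hS]
          simp only [pv_foldl_flush]
          have hmain := ih (pvApplyCur d cur) (some ("turn", [])) hd' (Or.inr (Or.inr (Or.inl rfl)))
          rw [pvApplyCur_some, pvApplySeg_nil _ _ hd' (Or.inr (Or.inr (Or.inl rfl)))] at hmain
          exact hmain
        · by_cases h4 : PySem.Str.startswith row "*** RIVER ***" = true
          · have hA : pvAStep (pvApplyCur d cur, Option.map Prod.fst cur) row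
                = (pvApplyCur d cur, some "river") := by
              unfold pvAStep; rw [if_neg h1, if_neg h2, if_neg h3, if_pos h4]
            have hS : pvSeg1 ([], cur) row = (pvFlush cur, some ("river", [])) := by
              unfold pvSeg1 pvMarker; rw [if_neg h1, if_neg h2, if_neg h3, if_pos h4]; cases cur <;> rfl
            rw [hA, hS]
            simp only [pv_foldl_flush]
            have hmain := ih (pvApplyCur d cur) (some ("river", [])) hd' (Or.inr (Or.inr (Or.inr rfl)))
            rw [pvApplyCur_some, pvApplySeg_nil _ _ hd' (Or.inr (Or.inr (Or.inr rfl)))] at hmain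
            exact hmain
          · have hm : pvMarker row = none := by
              unfold pvMarker; rw [if_neg h1, if_neg h2, if_neg h3, if_neg h4]
            by_cases h5 : (PySem.Str.startswith row "*** SHOWDOWN ***" ||
                PySem.Str.startswith row "*** SUMMARY ***") = true
            · have hA : pvAStep (pvApplyCur d cur, Option.map Prod.fst cur) row
                  = (pvApplyCur d cur, none) := by
                unfold pvAStep; rw [if_neg h1, if_neg h2, if_neg h3, if_neg h4, if_pos h5]
              have hS : pvSeg1 ([], cur) row = (pvFlush cur, none) := by
                unfold pvSeg1; rw [hm]; simp only; rw [if_pos h5]; cases cur <;> rfl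
              rw [hA, hS]
              simp only [pv_foldl_flush]
              exact ih (pvApplyCur d cur) none hd' trivial
            · cases cur with
              | none =>
                have hA : pvAStep (pvApplyCur d none, Option.map Prod.fst (none : Option (String × List String))) row
                    = (d, none) := by
                  unfold pvAStep
                  rw [if_neg h1, if_neg h2, if_neg h3, if_neg h4, if_neg h5]
                  rfl
                have hS : pvSeg1 ([], (none : Option (String × List String))) row = ([], none) := by
                  unfold pvSeg1; rw [hm]; simp only; rw [if_neg h5]
                rw [hA, hS]
                simp only [pv_foldl_flush, List.foldl_nil]
                exact ih d none hd trivial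
              | some seg =>
                obtain ⟨s, rs⟩ := seg
                have hS : pvSeg1 ([], some (s, rs)) row = ([], some (s, rs ++ [row])) := by
                  unfold pvSeg1; rw [hm]; simp only; rw [if_neg h5]
                have hstep : pvAStep (pvApplyCur d (some (s, rs)), Option.map Prod.fst (some (s, rs))) row
                    = ((match pvClassify row with
                        | some r => (pvApplyCur d (some (s, rs))).modify s [] (· ++ [r])
                        | none => pvApplyCur d (some (s, rs))), some s) := by
                  generalize pvApplyCur d (some (s, rs)) = d'
                  unfold pvAStep pvClassify
                  rw [if_neg h1, if_neg h2, if_neg h3, if_neg h4, if_neg h5]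
                  change (if PySem.Str.isIn ":" row = false then _ else _) = _
                  by_cases hcol : PySem.Str.isIn ":" row = false
                  · rw [if_pos hcol, if_pos hcol]
                    rfl
                  · rw [if_neg hcol, if_neg hcol]
                    cases hsp : PySem.Str.splitMax? row ":" 1 with
                    | none => rfl
                    | some l =>
                      cases l with
                      | nil => rfl
                      | cons actor l2 =>
                        cases l2 with
                        | nil => rfl
                        | cons rem0 rest =>
                          simp only [pvVerbs]
                          by_cases hv1 : PySem.Chars.startswith (PySem.Chars.strip rem0.toList) ['f','o','l','d','s'] = true
                          · simp [List.find?_cons, hv1]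
                          · by_cases hv2 : PySem.Chars.startswith (PySem.Chars.strip rem0.toList) ['c','h','e','c','k','s'] = true
                            · simp [List.find?_cons, hv1, hv2]
                            · by_cases hv3 : PySem.Chars.startswith (PySem.Chars.strip rem0.toList) ['c','a','l','l','s'] = true
                              · simp [List.find?_cons, hv1, hv2, hv3]
                              · by_cases hv4 : PySem.Chars.startswith (PySem.Chars.strip rem0.toList) ['b','e','t','s'] = true
                                · simp [List.find?_cons, hv1, hv2, hv3, hv4]
                                · by_cases hv5 : PySem.Chars.startswith (PySem.Chars.strip rem0.toList) ['r','a','i','s','e','s'] = true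
                                  · simp [List.find?_cons, hv1, hv2, hv3, hv4, hv5]
                                  · simp [List.find?_cons, hv1, hv2, hv3, hv4, hv5]
                rw [hstep, hS]
                simp only [List.foldl_nil, List.nil_append]
                cases hcl : pvClassify row with
                | none =>
                  have hmain := ih d (some (s, rs ++ [row])) hd hc
                  rw [pvApplyCur_some, pv_classify_append_none d s rs row hcl] at hmain
                  exact hmain
                | some r =>
                  have hmain := ih d (some (s, rs ++ [row])) hd hc
                  rw [pvApplyCur_some, pv_classify_append_some d s rs row r hcl] at hmain
                  exact hmain

-- ===== VERDICT (by name: the statement is the Claim_ definition above) =====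
theorem street_actions_py_spec : Claim_equal_street_actions_py := by
  intro block _
  unfold Spec_street_actions_py street_actions_py street_actions_py_alt
  have hinv : pvInv (PySem.Dict.mk [("preflop", []), ("flop", []), ("turn", []), ("river", [])]) := by
    refine ⟨?_, ?_, ?_, ?_, ?_⟩ <;> decide
  have hmain := pv_main block (PySem.Dict.mk [("preflop", []), ("flop", []), ("turn", []), ("river", [])])
    none hinv trivial
  simp only [pvApplyCur, Option.map_none] at hmain
  unfold pvSegsFrom pvFlush at hmain
  simp only [pvBStep_eq]
  rw [hmain]
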